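-- pv_equiv track=rewrite | github.com/rmejia4209/Advent-of-Code-2024 | Day_15/sol.py | separate_grid_and_moves
-- ===== SOURCE A (Python) =====
-- Grid = list[list[str]]
--
-- def separate_grid_and_moves(data: list[str]) -> tuple[Grid, str]:
--     """Separates the input data into a grid and a string of moves"""
--     grid = []
--     for line in data:
--         if line == '':
--             break
--         grid.append(list(line))
--     moves = ""
--     capture = False
--     for line in data:
--         capture = True if line == '' else capture
--         if capture:
--             moves += line
--     return grid, moves
-- ===== SOURCE B (Python) =====
-- def separate_grid_and_moves(data: list[str]) -> tuple[list[list[str]], str]: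
--     """Separates the input data into a grid and a string of moves (single pass)."""
--     grid, moves, seen_blank = [], [], False
--     for line in data:
--         if line == '':
--             seen_blank = True
--         elif seen_blank:
--             moves.append(line)
--         else:
--             grid.append(list(line))
--     return grid, ''.join(moves)
-- ===== Notes on version B (the rewrite author's own statement) =====
-- stated objective: simpler
-- what changed: One traversal with a seen_blank flag routing each line into grid or moves (joined once at the end) replaces A's two sequential scans (a break loop for the grid, then a capture-flag loop concatenating moves with +=).
import Mathlib
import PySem

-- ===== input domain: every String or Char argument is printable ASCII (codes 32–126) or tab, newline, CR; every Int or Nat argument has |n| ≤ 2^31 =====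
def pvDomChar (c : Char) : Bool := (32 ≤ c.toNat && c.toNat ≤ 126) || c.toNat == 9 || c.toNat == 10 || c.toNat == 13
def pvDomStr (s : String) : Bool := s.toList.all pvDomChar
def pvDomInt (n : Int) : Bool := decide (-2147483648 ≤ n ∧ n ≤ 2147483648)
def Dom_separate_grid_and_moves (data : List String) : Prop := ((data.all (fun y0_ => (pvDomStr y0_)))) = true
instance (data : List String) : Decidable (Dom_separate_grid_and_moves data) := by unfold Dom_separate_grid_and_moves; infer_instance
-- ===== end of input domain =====

-- B replaces A's two sequential scans by one pass with a seen_blank flag; simpler, same result.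

-- ===== PORT A =====
-- first loop of A: collect list(line) until the first '' (break)
def pvGridLoop : List String → List (List String)
  | [] => []
  | l :: rest => if l = "" then [] else (l.toList.map (fun c => String.ofList [c])) :: pvGridLoop rest

-- second loop of A: capture flag, moves += line
def pvMovesLoop : List String → Bool → String → String
  | [], _, moves => moves
  | l :: rest, capture, moves =>
    let capture' := if l = "" then true else capture
    pvMovesLoop rest capture' (if capture' then moves ++ l else moves)

def separate_grid_and_moves (data : List String) : List (List String) × String :=
  (pvGridLoop data, pvMovesLoop data false "")

-- ===== PORT B =====
-- single pass: '' sets the flag; afterwards lines go to moves, before to grid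
def pvAltLoop : List String → Bool → List (List String) × List String
  | [], _ => ([], [])
  | l :: rest, seenBlank =>
    if l = "" then pvAltLoop rest true
    else if seenBlank then
      let r := pvAltLoop rest seenBlank
      (r.1, l :: r.2)
    else
      let r := pvAltLoop rest seenBlank
      ((l.toList.map (fun c => String.ofList [c])) :: r.1, r.2)

def separate_grid_and_moves_alt (data : List String) : List (List String) × String :=
  let r := pvAltLoop data false
  (r.1, String.join r.2)

-- ===== PRECONDITION & SPEC =====
def Spec_separate_grid_and_moves (data : List String) (out : List (List String) × String) : Prop := out = separate_grid_and_moves_alt data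
instance (data : List String) (out : List (List String) × String) : Decidable (Spec_separate_grid_and_moves data out) := by unfold Spec_separate_grid_and_moves; infer_instance

-- ===== CLAIM (what is proved, stated in full; the proofs are below) =====
def Claim_equal_separate_grid_and_moves : Prop := ∀ (data : List String), Dom_separate_grid_and_moves data → Spec_separate_grid_and_moves data (separate_grid_and_moves data)

-- ===== LEMMAS AND PROOFS =====

theorem pvAltLoop_true_fst (data : List String) : (pvAltLoop data true).1 = [] := by
  induction data with
  | nil => rfl
  | cons l rest ih => by_cases h : l = "" <;> simp [pvAltLoop, h, ih]

theorem pvGridLoop_eq_alt (data : List String) : (pvAltLoop data false).1 = pvGridLoop data := by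
  induction data with
  | nil => rfl
  | cons l rest ih =>
    by_cases h : l = "" <;> simp [pvAltLoop, pvGridLoop, h, ih, pvAltLoop_true_fst]

theorem string_append_assoc (a b c : String) : a ++ b ++ c = a ++ (b ++ c) := by
  apply String.ext
  simp

theorem pvMovesLoop_acc (data : List String) (c : Bool) (m : String) :
    pvMovesLoop data c m = m ++ pvMovesLoop data c "" := by
  induction data generalizing c m with
  | nil => simp [pvMovesLoop]
  | cons l rest ih =>
    by_cases h : l = ""
    · simp [pvMovesLoop, h]
      exact ih true m
    · cases c
      · simp [pvMovesLoop, h]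
        exact ih false m
      · simp [pvMovesLoop, h]
        rw [ih true (m ++ l), ih true l, string_append_assoc]

theorem join_acc (L : List String) (a : String) :
    List.foldl (fun r s => r ++ s) a L = a ++ String.join L := by
  induction L generalizing a with
  | nil => simp [String.join]
  | cons x xs ih =>
    simp only [List.foldl, String.join]
    rw [ih (a ++ x), ih ("" ++ x), string_append_assoc]
    simp

theorem string_join_cons (l : String) (L : List String) :
    String.join (l :: L) = l ++ String.join L := by
  rw [String.join, List.foldl, join_acc]
  simp [String.join]

theorem pvMovesLoop_eq_alt (data : List String) (c : Bool) :
    pvMovesLoop data c "" = String.join (pvAltLoop data c).2 := by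
  induction data generalizing c with
  | nil => cases c <;> rfl
  | cons l rest ih =>
    by_cases h : l = ""
    · simp [pvMovesLoop, pvAltLoop, h]
      rw [pvMovesLoop_acc, ih]
      simp
    · cases c
      · simp [pvMovesLoop, pvAltLoop, h, ih]
      · simp [pvMovesLoop, pvAltLoop, h, string_join_cons]
        rw [pvMovesLoop_acc, ih]

-- ===== VERDICT (by name: the statement is the Claim_ definition above) =====
theorem separate_grid_and_moves_spec : Claim_equal_separate_grid_and_moves := by
  intro data _
  unfold Spec_separate_grid_and_moves separate_grid_and_moves separate_grid_and_moves_alt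
  simp [pvGridLoop_eq_alt, pvMovesLoop_eq_alt]
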